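-- pv_equiv track=rewrite | github.com/fore0919/Algorithm | programmers/practice/Lv2.연습문제.py | solution
-- ===== SOURCE A (Python) =====
-- from collections import Counter
-- from collections import Counter
--
-- def solution(topping):
--     answer = 0
--     counter = Counter(topping)
--     set_dic = set()
--     for i in topping:
--         counter[i] -= 1
--         set_dic.add(i)
--         if counter[i] == 0:
--             counter.pop(i)
--         if len(counter) == len(set_dic):
--             answer += 1
--     return answer
-- ===== SOURCE B (Python) =====
-- def solution(topping):
--     # suffix table of distinct-topping counts, then one forward pass
--     rights = [0]
--     seen = set()
--     for t in reversed(topping):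
--         seen.add(t)
--         rights.append(len(seen))
--     rights.reverse()
--     answer = 0
--     left = set()
--     for t, r in zip(topping, rights[1:]):
--         left.add(t)
--         if len(left) == r:
--             answer += 1
--     return answer
-- ===== Notes on version B (the rewrite author's own statement) =====
-- stated objective: faster
-- what changed: A decrements a live Counter and pops exhausted keys while it scans; B precomputes a suffix distinct-count table in a backward pass and then counts matches in a forward pass over zip(topping, table[1:]) with a growing left set, avoiding per-element dict mutation.
import Mathlib
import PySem

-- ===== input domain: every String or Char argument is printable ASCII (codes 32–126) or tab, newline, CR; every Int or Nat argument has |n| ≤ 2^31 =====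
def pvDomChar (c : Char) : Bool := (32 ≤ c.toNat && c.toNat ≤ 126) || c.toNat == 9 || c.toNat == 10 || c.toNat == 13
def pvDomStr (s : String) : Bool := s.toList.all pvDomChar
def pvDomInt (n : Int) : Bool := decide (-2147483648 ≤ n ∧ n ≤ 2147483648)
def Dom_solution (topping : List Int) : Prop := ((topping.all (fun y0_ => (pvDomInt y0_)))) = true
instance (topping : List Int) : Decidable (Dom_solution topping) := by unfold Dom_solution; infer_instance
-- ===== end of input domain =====

-- B replaces A's live Counter-decrement pass by a precomputed suffix distinct-count table
-- plus a forward pass over a growing left set (different decomposition, same O(n) cost).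

-- ===== PORT A =====
-- A: answer=0; counter=Counter(topping); set_dic=set(); for i in topping: counter[i]-=1;
--    set_dic.add(i); if counter[i]==0: counter.pop(i); if len(counter)==len(set_dic): answer+=1
def solution (topping : List Int) : Int :=
  (topping.foldl
    (fun (st : Int × PySem.Dict Int Int × PySem.Set Int) i =>
      let counter := st.2.1.modify i 0 (· - 1)
      let set_dic := PySem.Set.add st.2.2 i
      let counter := if counter.getD i 0 = 0 then counter.erase i else counter
      let answer := if (counter.size : Int) = set_dic.len then st.1 + 1 else st.1
      (answer, counter, set_dic))
    ((0 : Int), PySem.Dict.counter topping, PySem.Set.empty)).1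

-- ===== PORT B =====
-- B: backward pass building rights (suffix distinct counts), then forward pass over
--    zip(topping, rights[1:]) with a growing left set.
def solution_alt (topping : List Int) : Int :=
  let p := topping.reverse.foldl
    (fun (p : PySem.Set Int × List Int) t =>
      let seen := PySem.Set.add p.1 t
      (seen, p.2 ++ [seen.len]))
    (PySem.Set.empty, [(0 : Int)])
  let rights := p.2.reverse
  ((topping.zip (PySem.List.slice rights (some 1) none)).foldl
    (fun (q : PySem.Set Int × Int) tr =>
      let left := PySem.Set.add q.1 tr.1
      (left, if left.len = tr.2 then q.2 + 1 else q.2))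
    (PySem.Set.empty, (0 : Int))).2

-- ===== PRECONDITION & SPEC =====
def Spec_solution (topping : List Int) (out : Int) : Prop := out = solution_alt topping
instance (topping : List Int) (out : Int) : Decidable (Spec_solution topping out) := by unfold Spec_solution; infer_instance

-- ===== CLAIM (what is proved, stated in full; the proofs are below) =====
def Claim_equal_solution : Prop := ∀ (topping : List Int), Dom_solution topping → Spec_solution topping (solution topping)

-- ===== LEMMAS AND PROOFS =====

-- number of distinct elements of l, as an Int
def dLen (l : List Int) : Int := (PySem.Set.ofList l).len

-- reference count: walking l with left set `left`, count positions where the grown left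
-- set has as many distinct elements as the remaining suffix
def refCount : PySem.Set Int → List Int → Int
  | _, [] => 0
  | left, x :: xs =>
    (if (PySem.Set.add left x).len = dLen xs then 1 else 0) + refCount (PySem.Set.add left x) xs

-- two nodup lists with the same members have the same length
theorem pv_nodup_len_eq (m1 m2 : List Int) (h1 : m1.Nodup) (h2 : m2.Nodup)
    (hm : ∀ a, a ∈ m1 ↔ a ∈ m2) : m1.length = m2.length :=
  (((List.perm_ext_iff_of_nodup h1 h2).2 hm)).length_eq

-- ---- Dict.erase facts (erase filters the items list) ----
theorem pv_find?_filter (l : List (Int × Int)) (k k' : Int) (h : k' ≠ k) :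
    (l.filter (fun p => !(p.1 == k))).find? (fun p => p.1 == k') = l.find? (fun p => p.1 == k') := by
  induction l with
  | nil => rfl
  | cons a t ih =>
    have hkk : (k == k') = false := by simpa using fun hh => h hh.symm
    by_cases hk : a.1 = k
    · simp [hk, hkk, ih]
    · by_cases hk' : a.1 = k'
      · simp [List.filter_cons, hk', if_neg h]
      · simp [hk, hk', ih]

theorem pv_getD_erase (d : PySem.Dict Int Int) (k k' : Int) :
    (d.erase k).getD k' 0 = if k' = k then 0 else d.getD k' 0 := by
  by_cases h : k' = k
  · subst h
    have : (d.items.filter (fun p => !(p.1 == k'))).find? (fun p => p.1 == k') = none := by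
      apply List.find?_eq_none.2
      intro p hp
      have := List.of_mem_filter hp
      simpa using this
    simp [PySem.Dict.erase, PySem.Dict.getD, PySem.Dict.get?, this]
  · simp [PySem.Dict.erase, PySem.Dict.getD, PySem.Dict.get?, pv_find?_filter d.items k k' h, h]

theorem pv_contains_erase (d : PySem.Dict Int Int) (k k' : Int) :
    (d.erase k).contains k' = true ↔ (k' ≠ k ∧ d.contains k' = true) := by
  simp only [PySem.Dict.erase, PySem.Dict.contains, List.any_eq_true]
  constructor
  · rintro ⟨p, hp, hpk⟩
    have hmem := List.of_mem_filter hp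
    have hin := List.mem_of_mem_filter hp
    constructor
    · intro hkk; subst hkk
      simp at hpk hmem
      exact hmem hpk
    · exact ⟨p, hin, hpk⟩
  · rintro ⟨hne, p, hp, hpk⟩
    refine ⟨p, List.mem_filter.2 ⟨hp, ?_⟩, hpk⟩
    simp at hpk ⊢
    rw [hpk]; exact hne

theorem pv_nodup_keys_erase (d : PySem.Dict Int Int) (k : Int) (h : d.keys.Nodup) :
    (d.erase k).keys.Nodup := by
  have hsub : (d.erase k).items.Sublist d.items := List.filter_sublist
  exact h.sublist (hsub.map _)

-- ---- A-side loop invariant ----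
def pvInv (d : PySem.Dict Int Int) (s : List Int) : Prop :=
  d.keys.Nodup ∧ (∀ k, d.getD k 0 = (s.count k : Int)) ∧ (∀ k, d.contains k = true ↔ k ∈ s)

theorem pv_size_of_inv (d : PySem.Dict Int Int) (s : List Int) (h : pvInv d s) :
    (d.size : Int) = dLen s := by
  obtain ⟨hnd, _, hc⟩ := h
  have hlen : d.keys.length = (PySem.Set.ofList s).length := by
    apply pv_nodup_len_eq _ _ hnd (PySem.Set.nodup_ofList s)
    intro a
    rw [PySem.Set.mem_ofList, ← hc a, ← PySem.Dict.contains_iff_mem_keys]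
  have : d.size = d.keys.length := by simp [PySem.Dict.size, PySem.Dict.keys]
  simp [this, hlen, dLen, PySem.Set.len_eq]

theorem pv_inv_step (d : PySem.Dict Int Int) (x : Int) (s : List Int) (h : pvInv d (x :: s)) :
    pvInv (if (d.modify x 0 (· - 1)).getD x 0 = 0
         then (d.modify x 0 (· - 1)).erase x else d.modify x 0 (· - 1)) s := by
  obtain ⟨hnd, hg, hc⟩ := h
  have hnd1 : (d.modify x 0 (· - 1)).keys.Nodup := by
    rw [PySem.Dict.keys_modify]
    exact PySem.Dict.nodup_keys_insert d x _ hnd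
  have hg1 : ∀ k, (d.modify x 0 (· - 1)).getD k 0 =
      if k = x then (((x :: s).count x : Int) - 1) else ((x :: s).count k : Int) := by
    intro k
    rw [PySem.Dict.getD_modify]
    by_cases hk : k = x <;> simp [hk, hg]
  have hcx : ((x :: s).count x : Int) - 1 = (s.count x : Int) := by
    simp
  by_cases h0 : (d.modify x 0 (· - 1)).getD x 0 = 0
  · -- x exhausted: it does not occur in s, the key is popped
    have hsx : s.count x = 0 := by
      have h1 := (hg1 x).symm.trans h0
      rw [if_pos rfl, hcx] at h1
      exact_mod_cast h1
    refine ⟨?_, ?_, ?_⟩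
    · rw [if_pos h0]
      exact pv_nodup_keys_erase _ x hnd1
    · intro k
      rw [if_pos h0, pv_getD_erase]
      by_cases hk : k = x
      · simp [hk, hsx]
      · rw [if_neg hk, hg1, if_neg hk]
        simp [Ne.symm hk]
    · intro k
      rw [if_pos h0, pv_contains_erase]
      by_cases hk : k = x
      · subst hk
        simp [List.count_eq_zero.mp hsx]
      · rw [PySem.Dict.contains_modify]
        simp [hk, hc, List.mem_cons]
  · -- x still occurs in s
    have hsx : x ∈ s := by
      have h1 := hg1 x
      rw [if_pos rfl, hcx] at h1
      have hz : s.count x ≠ 0 := by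
        intro hz
        exact h0 (by rw [h1, hz]; simp)
      exact List.count_pos_iff.mp (Nat.pos_of_ne_zero hz)
    refine ⟨?_, ?_, ?_⟩
    · rw [if_neg h0]; exact hnd1
    · intro k
      rw [if_neg h0, hg1]
      by_cases hk : k = x
      · subst hk; rw [if_pos rfl, hcx]
      · rw [if_neg hk]
        simp [Ne.symm hk]
    · intro k
      rw [if_neg h0, PySem.Dict.contains_modify]
      by_cases hk : k = x
      · simp [hk, hsx]
      · simp [hk, hc, List.mem_cons]

theorem pv_afold (s : List Int) : ∀ (d : PySem.Dict Int Int) (left : PySem.Set Int) (ans : Int),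
    pvInv d s →
    (s.foldl
      (fun (st : Int × PySem.Dict Int Int × PySem.Set Int) i =>
        let counter := st.2.1.modify i 0 (· - 1)
        let set_dic := PySem.Set.add st.2.2 i
        let counter := if counter.getD i 0 = 0 then counter.erase i else counter
        let answer := if (counter.size : Int) = set_dic.len then st.1 + 1 else st.1
        (answer, counter, set_dic))
      (ans, d, left)).1 = ans + refCount left s := by
  induction s with
  | nil => intro d left ans _; simp [refCount]
  | cons x xs ih =>
    intro d left ans hinv
    have hinv' := pv_inv_step d x xs hinv
    have hsz := pv_size_of_inv _ xs hinv'
    simp only [List.foldl_cons]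
    rw [ih _ _ _ hinv']
    simp only [refCount]
    rw [hsz]
    by_cases hcond : (PySem.Set.add left x).len = dLen xs
    · rw [if_pos hcond.symm, if_pos hcond]; ring
    · rw [if_neg (fun h => hcond h.symm), if_neg hcond]; ring

theorem pv_solution_eq_ref (topping : List Int) :
    solution topping = refCount PySem.Set.empty topping := by
  unfold solution
  rw [pv_afold topping (PySem.Dict.counter topping) PySem.Set.empty 0 ?_]
  · ring
  · refine ⟨PySem.Dict.nodup_keys_counter topping, ?_, ?_⟩
    · intro k; exact PySem.Dict.getD_counter topping k
    · intro k; rw [PySem.Dict.contains_counter]; simp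

-- ---- B side ----
def revSnd : PySem.Set Int → List Int → List Int
  | _, [] => []
  | seen, t :: ts => (PySem.Set.add seen t).len :: revSnd (PySem.Set.add seen t) ts

theorem pv_bfold1 (r : List Int) : ∀ (seen : PySem.Set Int) (acc : List Int),
    (r.foldl
      (fun (p : PySem.Set Int × List Int) t =>
        let seen := PySem.Set.add p.1 t
        (seen, p.2 ++ [seen.len]))
      (seen, acc)) = (PySem.Set.update seen r, acc ++ revSnd seen r) := by
  induction r with
  | nil => intro seen acc; simp [revSnd, PySem.Set.update]
  | cons t ts ih =>
    intro seen acc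
    simp only [List.foldl_cons]
    rw [ih]
    simp [revSnd, PySem.Set.update, List.append_assoc]

theorem pv_revSnd_append (a b : List Int) : ∀ (seen : PySem.Set Int),
    revSnd seen (a ++ b) = revSnd seen a ++ revSnd (PySem.Set.update seen a) b := by
  induction a with
  | nil => intro seen; simp [revSnd, PySem.Set.update]
  | cons x xs ih =>
    intro seen
    simp only [List.cons_append, revSnd, ih, PySem.Set.update, List.foldl_cons]

def suffLens : List Int → List Int
  | [] => []
  | _ :: xs => dLen xs :: suffLens xs

theorem pv_len_add_ofList_reverse (x : Int) (xs : List Int) :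
    (PySem.Set.add (PySem.Set.ofList xs.reverse) x).len = dLen (x :: xs) := by
  have h : (PySem.Set.add (PySem.Set.ofList xs.reverse) x).length
      = (PySem.Set.ofList (x :: xs)).length := by
    apply pv_nodup_len_eq
    · exact PySem.Set.nodup_add _ x (PySem.Set.nodup_ofList _)
    · exact PySem.Set.nodup_ofList _
    · intro a
      rw [PySem.Set.mem_add, PySem.Set.mem_ofList, PySem.Set.mem_ofList]
      simp [List.mem_cons, or_comm]
  simp [PySem.Set.len_eq, dLen, h]

theorem pv_update_empty (l : List Int) : PySem.Set.update PySem.Set.empty l = PySem.Set.ofList l := rfl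

theorem pv_rights (l : List Int) :
    (revSnd PySem.Set.empty l.reverse).reverse ++ [(0 : Int)] = dLen l :: suffLens l := by
  induction l with
  | nil => simp [revSnd, dLen, suffLens, PySem.Set.ofList, PySem.Set.len_eq, PySem.Set.empty]
  | cons x xs ih =>
    rw [List.reverse_cons, pv_revSnd_append, pv_update_empty]
    simp only [revSnd, List.reverse_append, List.reverse_cons, List.reverse_nil,
      List.nil_append, List.cons_append]
    rw [pv_len_add_ofList_reverse]
    simp only [suffLens]
    rw [← ih]

theorem pv_bfold2 (l : List Int) : ∀ (left : PySem.Set Int) (ans : Int),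
    ((l.zip (suffLens l)).foldl
      (fun (q : PySem.Set Int × Int) tr =>
        let lft := PySem.Set.add q.1 tr.1
        (lft, if lft.len = tr.2 then q.2 + 1 else q.2))
      (left, ans)).2 = ans + refCount left l := by
  induction l with
  | nil => intro left ans; simp [suffLens, refCount]
  | cons x xs ih =>
    intro left ans
    simp only [suffLens, List.zip_cons_cons, List.foldl_cons]
    rw [ih]
    simp only [refCount]
    by_cases hcond : (PySem.Set.add left x).len = dLen xs
    · rw [if_pos hcond, if_pos hcond]; ring
    · rw [if_neg hcond, if_neg hcond]; ring

theorem pv_alt_eq_ref (topping : List Int) :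
    solution_alt topping = refCount PySem.Set.empty topping := by
  unfold solution_alt
  rw [pv_bfold1]
  simp only [List.nil_append, List.cons_append]
  have hr : (((0 : Int) :: revSnd PySem.Set.empty topping.reverse).reverse)
      = (revSnd PySem.Set.empty topping.reverse).reverse ++ [(0 : Int)] := by
    simp
  rw [hr, pv_rights, PySem.List.slice_from_one]
  simp only [List.tail_cons]
  rw [pv_bfold2]
  ring

-- ===== VERDICT (by name: the statement is the Claim_ definition above) =====
theorem solution_spec : Claim_equal_solution := by
  intro topping _
  unfold Spec_solution
  rw [pv_solution_eq_ref, pv_alt_eq_ref]
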